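-- pv_equiv track=rewrite | github.com/jimmyjdejesus-cmyk/allele-ai | src/allele/observability/ml_analytics/alert_intelligence.py | _find_common_attributes
-- ===== SOURCE A (Python) =====
-- from typing import Any, Dict, List
--
-- def _find_common_attributes(alerts: List[Dict[str, Any]]) -> Dict[str, Any]:
--     """Find common attributes across alerts.
--
--     Args:
--         alerts: List of alerts
--
--     Returns:
--         Dictionary of common attributes
--     """
--     if not alerts:
--         return {}
--
--     common = {}
--     all_keys = set()
--
--     # Collect all keys
--     for alert in alerts:
--         all_keys.update(alert.keys())
--
--     # Find common values
--     for key in all_keys: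
--         values = [alert.get(key) for alert in alerts if key in alert]
--         if len(set(values)) == 1:  # All same value
--             common[key] = values[0]
--
--     return common
-- ===== SOURCE B (Python) =====
-- from typing import Any, Dict, List
--
-- def _find_common_attributes(alerts: List[Dict[str, Any]]) -> Dict[str, Any]:
--     if not alerts:
--         return {}
--     # single pass: per key keep (first value seen, all-values-equal flag)
--     info = {}
--     for alert in alerts:
--         for key, value in alert.items():
--             if key not in info:
--                 info[key] = (value, True)
--             else:
--                 first, ok = info[key]
--                 info[key] = (first, ok and first == value)
--     return {key: first for key, (first, ok) in info.items() if ok}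
-- ===== Notes on version B (the rewrite author's own statement) =====
-- stated objective: faster
-- what changed: Replaces A's two-phase scheme (collect all keys into a set, then rescan every alert once per key and build a set of its values) by a single pass over all alert entries that keeps, per key, the first value seen and an all-values-equal flag.
import Mathlib
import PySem

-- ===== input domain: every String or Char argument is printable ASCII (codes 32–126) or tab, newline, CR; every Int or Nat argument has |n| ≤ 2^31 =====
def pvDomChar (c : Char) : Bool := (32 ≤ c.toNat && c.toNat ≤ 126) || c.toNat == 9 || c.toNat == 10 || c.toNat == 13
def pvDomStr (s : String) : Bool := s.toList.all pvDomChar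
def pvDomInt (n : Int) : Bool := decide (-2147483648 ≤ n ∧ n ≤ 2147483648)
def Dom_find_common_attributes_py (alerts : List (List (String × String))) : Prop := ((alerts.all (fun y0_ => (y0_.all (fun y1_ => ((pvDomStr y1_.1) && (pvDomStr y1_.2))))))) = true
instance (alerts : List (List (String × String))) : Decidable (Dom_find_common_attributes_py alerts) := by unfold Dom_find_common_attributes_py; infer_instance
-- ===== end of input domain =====

-- B replaces A's two phases (collect every key, then rescan all alerts once per key) by a single pass
-- over the alert entries that accumulates, per key, the first value and an all-equal flag: O(total entries)
-- instead of O(#keys * #alerts).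

-- shared helper: Python's first-match lookup `alert.get(key)` on the association-list encoding of a dict
def pvGetKey? (a : List (String × String)) (k : String) : Option String :=
  (a.find? (fun p => p.1 == k)).map (·.2)

-- ===== PORT A =====
def find_common_attributes_py (alerts : List (List (String × String))) : List (String × String) :=
  if alerts = [] then []
  else
    -- all_keys.update(alert.keys()) for each alert
    let all_keys : PySem.Set String :=
      alerts.foldl (fun s alert => PySem.Set.update s (alert.map (·.1))) PySem.Set.empty
    -- for key in all_keys: values = [alert.get(key) for alert in alerts if key in alert]
    let common : PySem.Dict String String :=
      all_keys.foldl (fun c key =>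
        let values : List String := alerts.filterMap (fun alert => pvGetKey? alert key)
        -- values[0]: only read under the guard len(set(values)) == 1, which forces values ≠ []
        if PySem.Set.len (PySem.Set.ofList values) = 1 then c.insert key (values.headD "") else c)
        PySem.Dict.empty
    common.items

-- ===== PORT B =====
-- info[key] = (value, True) on first sight; else info[key] = (first, ok and first == value)
def pvStep (d : PySem.Dict String (String × Bool)) (kv : String × String) : PySem.Dict String (String × Bool) :=
  d.insert kv.1 (match d.get? kv.1 with
    | none => (kv.2, true)
    | some fo => (fo.1, fo.2 && fo.1 == kv.2))

def find_common_attributes_py_alt (alerts : List (List (String × String))) : List (String × String) :=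
  if alerts = [] then []
  else
    let info : PySem.Dict String (String × Bool) :=
      alerts.foldl (fun d alert => alert.foldl pvStep d) PySem.Dict.empty
    (info.items.filter (fun p => p.2.2)).map (fun p => (p.1, p.2.1))

-- ===== PRECONDITION & SPEC =====
-- Pre_ excludes alert lists in which some alert's association list repeats a key: such a list does not
-- encode any Python dict (Python dict keys are unique), so A's behaviour on it is not defined by A.
def Pre_find_common_attributes_py (alerts : List (List (String × String))) : Prop :=
  ∀ a ∈ alerts, (a.map (·.1)).Nodup
instance (alerts : List (List (String × String))) : Decidable (Pre_find_common_attributes_py alerts) := by unfold Pre_find_common_attributes_py; infer_instance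

def pvWitness_find_common_attributes_py : (List (List (String × String))) :=
  [[("service", "api"), ("severity", "high")], [("service", "api")]]

def Spec_find_common_attributes_py (alerts : List (List (String × String))) (out : List (String × String)) : Prop := out = find_common_attributes_py_alt alerts
instance (alerts : List (List (String × String))) (out : List (String × String)) : Decidable (Spec_find_common_attributes_py alerts out) := by unfold Spec_find_common_attributes_py; infer_instance

-- ===== CLAIM (what is proved, stated in full; the proofs are below) =====
def Claim_equal_find_common_attributes_py : Prop := ∀ (alerts : List (List (String × String))), Dom_find_common_attributes_py alerts → Pre_find_common_attributes_py alerts → Spec_find_common_attributes_py alerts (find_common_attributes_py alerts)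

-- ===== LEMMAS AND PROOFS =====

-- the per-key effect of pvStep, as a function of the stream of values seen for that key
def pvRun (o : Option (String × Bool)) (vs : List String) : Option (String × Bool) :=
  vs.foldl (fun o v => some (match o with
    | none => (v, true)
    | some fo => (fo.1, fo.2 && fo.1 == v))) o

theorem pvRun_some (f : String) (ok : Bool) (vs : List String) :
    pvRun (some (f, ok)) vs = some (f, ok && vs.all (fun x => f == x)) := by
  induction vs generalizing ok with
  | nil => simp [pvRun]
  | cons v t ih =>
      simp only [pvRun, List.foldl_cons] at *
      rw [ih (ok && (f == v))]
      simp [Bool.and_assoc]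

theorem get?_foldl_pvStep (l : List (String × String)) (d : PySem.Dict String (String × Bool)) (k : String) :
    (l.foldl pvStep d).get? k = pvRun (d.get? k) ((l.filter (fun p => p.1 == k)).map (·.2)) := by
  induction l generalizing d with
  | nil => simp [pvRun]
  | cons p t ih =>
      rw [List.foldl_cons, ih]
      by_cases h : p.1 = k
      · have h1 : (pvStep d p).get? k = some (match d.get? k with
          | none => (p.2, true)
          | some fo => (fo.1, fo.2 && fo.1 == p.2)) := by
          simp [pvStep, h, PySem.Dict.get?_insert_self]
        rw [h1]
        simp only [List.filter_cons, h, beq_self_eq_true]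
        simp [pvRun]
      · have h1 : (pvStep d p).get? k = d.get? k := by
          simp only [pvStep]
          exact PySem.Dict.get?_insert_of_ne _ _ (fun hk => h hk.symm)
        rw [h1]
        simp [beq_eq_false_iff_ne.mpr h]

theorem filter_eq_get_of_nodup (a : List (String × String)) (k : String) (h : (a.map (·.1)).Nodup) :
    (a.filter (fun p => p.1 == k)).map (·.2) = (pvGetKey? a k).toList := by
  induction a with
  | nil => simp [pvGetKey?]
  | cons p t ih =>
      simp only [List.map_cons, List.nodup_cons] at h
      by_cases hp : p.1 = k
      · have ht : t.filter (fun p => p.1 == k) = [] := by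
          apply List.filter_eq_nil_iff.mpr
          intro q hq hqk
          exact h.1 (hp ▸ (beq_iff_eq.mp hqk) ▸ List.mem_map_of_mem hq)
        simp [hp, ht, pvGetKey?]
      · have hpk : (p.1 == k) = false := beq_eq_false_iff_ne.mpr hp
        simp only [List.filter_cons, if_neg Bool.false_ne_true, pvGetKey?, List.find?_cons, hpk]
        exact ih h.2

theorem vals_eq (alerts : List (List (String × String)))
    (h : ∀ a ∈ alerts, (a.map (·.1)).Nodup) (k : String) :
    ((alerts.flatten.filter (fun p => p.1 == k)).map (·.2))
      = alerts.filterMap (fun a => pvGetKey? a k) := by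
  induction alerts with
  | nil => simp
  | cons a t ih =>
      simp only [List.flatten_cons, List.filter_append, List.map_append, List.filterMap_cons]
      rw [filter_eq_get_of_nodup a k (h a (List.mem_cons_self)),
          ih (fun x hx => h x (List.mem_cons_of_mem _ hx))]
      cases pvGetKey? a k <;> simp

theorem allkeys_eq (alerts : List (List (String × String))) :
    alerts.foldl (fun s alert => PySem.Set.update s (alert.map (·.1))) PySem.Set.empty
      = PySem.Set.ofList (alerts.flatten.map (·.1)) := by
  rw [PySem.Set.ofList_eq_foldl, List.map_flatten, List.foldl_flatten, List.foldl_map]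
  rfl

theorem info_eq (alerts : List (List (String × String))) :
    alerts.foldl (fun d alert => alert.foldl pvStep d) PySem.Dict.empty
      = alerts.flatten.foldl pvStep PySem.Dict.empty := by
  rw [List.foldl_flatten]

theorem keys_info (alerts : List (List (String × String))) :
    (alerts.flatten.foldl pvStep PySem.Dict.empty).keys
      = PySem.Set.ofList (alerts.flatten.map (·.1)) := by
  have h := PySem.Dict.keys_foldl_insert_key (ν := String × Bool) alerts.flatten (fun p => p.1)
    (fun d kv => match d.get? kv.1 with
      | none => (kv.2, true)
      | some fo => (fo.1, fo.2 && fo.1 == kv.2)) PySem.Dict.empty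
  have : alerts.flatten.foldl pvStep PySem.Dict.empty
      = alerts.flatten.foldl (fun d kv => d.insert kv.1 (match d.get? kv.1 with
          | none => (kv.2, true)
          | some fo => (fo.1, fo.2 && fo.1 == kv.2))) PySem.Dict.empty := rfl
  rw [this, h, PySem.Set.ofList_eq_foldl]
  rfl


theorem foldl_add_singleton (v : String) (t : List String) (h : ∀ x ∈ t, x = v) :
    List.foldl PySem.Set.add [v] t = [v] := by
  induction t with
  | nil => rfl
  | cons x r ih =>
      rw [List.foldl_cons, PySem.Set.add_of_mem (by simp [h x List.mem_cons_self])]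
      exact ih (fun y hy => h y (List.mem_cons_of_mem _ hy))

theorem setLen_one_iff (v : String) (t : List String) :
    PySem.Set.len (PySem.Set.ofList (v :: t)) = 1 ↔ t.all (fun x => v == x) = true := by
  constructor
  · intro h
    have hlen : (PySem.Set.ofList (v :: t)).length = 1 := by
      simpa [PySem.Set.len] using h
    obtain ⟨y, hy⟩ := List.length_eq_one_iff.mp hlen
    have hv : v = y := by
      have := (PySem.Set.mem_ofList (v :: t) v).mpr List.mem_cons_self
      rw [hy] at this; simpa using this
    simp only [List.all_eq_true]
    intro x hx
    have := (PySem.Set.mem_ofList (v :: t) x).mpr (List.mem_cons_of_mem _ hx)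
    rw [hy] at this
    simp only [List.mem_singleton] at this
    simp [this, hv]
  · intro h
    simp only [List.all_eq_true] at h
    have : PySem.Set.ofList (v :: t) = [v] := by
      rw [PySem.Set.ofList_eq_foldl, List.foldl_cons]
      have : PySem.Set.add [] v = [v] := rfl
      rw [this]
      exact foldl_add_singleton v t (fun x hx => ((beq_iff_eq.mp (h x hx)).symm : x = v))
    simp [PySem.Set.len, this]

theorem decide_eq_of_iff (P : Prop) [Decidable P] (b : Bool) (h : P ↔ b = true) : decide P = b := by
  cases b <;> simp [h]

theorem items_foldl_ite (cond : String → Prop) [DecidablePred cond] (val : String → String)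
    (l : List String) (d : PySem.Dict String String) (hnd : l.Nodup)
    (hfresh : ∀ k ∈ l, d.contains k = false) :
    (l.foldl (fun c k => if cond k then c.insert k (val k) else c) d).items
      = d.items ++ (l.filter (fun k => decide (cond k))).map (fun k => (k, val k)) := by
  induction l generalizing d with
  | nil => simp
  | cons k t ih =>
      simp only [List.nodup_cons] at hnd
      have hk : d.contains k = false := hfresh k List.mem_cons_self
      have hft : ∀ k' ∈ t, (if cond k then d.insert k (val k) else d).contains k' = false := by
        intro k' hk'
        split
        · rw [PySem.Dict.contains_insert]
          have : (k' == k) = false := beq_eq_false_iff_ne.mpr (fun he => hnd.1 (he ▸ hk'))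
          simp [this, hfresh k' (List.mem_cons_of_mem _ hk')]
        · exact hfresh k' (List.mem_cons_of_mem _ hk')
      rw [List.foldl_cons, ih _ hnd.2 hft]
      by_cases hc : cond k
      · have hins : (d.insert k (val k)).items = d.items ++ [(k, val k)] := by
          simp [PySem.Dict.insert, hk]
        simp [hc, hins]
      · simp [hc]

-- ===== VERDICT (by name: the statement is the Claim_ definition above) =====
theorem find_common_attributes_py_spec : Claim_equal_find_common_attributes_py := by
  intro alerts _ hPre
  unfold Spec_find_common_attributes_py
  by_cases hnil : alerts = []
  · simp [find_common_attributes_py, find_common_attributes_py_alt, hnil]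
  · unfold find_common_attributes_py find_common_attributes_py_alt
    rw [if_neg hnil, if_neg hnil]
    simp only [allkeys_eq, info_eq]
    have hkeys : (alerts.flatten.foldl pvStep PySem.Dict.empty).keys
        = PySem.Set.ofList (alerts.flatten.map (·.1)) := keys_info alerts
    have hnd : (alerts.flatten.foldl pvStep PySem.Dict.empty).keys.Nodup :=
      hkeys ▸ PySem.Set.nodup_ofList _
    -- A's side: a conditional-insert loop over distinct fresh keys appends exactly the kept pairs
    rw [items_foldl_ite (fun key => PySem.Set.len (PySem.Set.ofList
          (alerts.filterMap (fun alert => pvGetKey? alert key))) = 1)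
        (fun key => (alerts.filterMap (fun alert => pvGetKey? alert key)).headD "")
        (PySem.Set.ofList (alerts.flatten.map (·.1))) PySem.Dict.empty
        (PySem.Set.nodup_ofList _) (fun _ _ => rfl)]
    -- B's side: items as a map over the (deduplicated) key list
    rw [PySem.Dict.items_eq_map_keys _ hnd ("", false), hkeys, List.filter_map, List.map_map]
    have hempitems : PySem.Dict.empty.items = ([] : List (String × String)) := rfl
    rw [hempitems, List.nil_append]
    -- pointwise agreement on every key of the key set
    have point : ∀ k ∈ PySem.Set.ofList (alerts.flatten.map (·.1)),
        ∃ v t, alerts.filterMap (fun alert => pvGetKey? alert k) = v :: t ∧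
          (alerts.flatten.foldl pvStep PySem.Dict.empty).getD k ("", false)
            = (v, t.all (fun x => v == x)) := by
      intro k hk
      have hkK : k ∈ alerts.flatten.map (·.1) := (PySem.Set.mem_ofList _ k).mp hk
      obtain ⟨p, hp, hpk⟩ := List.mem_map.mp hkK
      have hvals := vals_eq alerts hPre k
      have hne : alerts.filterMap (fun alert => pvGetKey? alert k) ≠ [] := by
        intro habs
        rw [← hvals] at habs
        simp only [List.map_eq_nil_iff, List.filter_eq_nil_iff] at habs
        exact habs p hp (beq_iff_eq.mpr hpk)
      obtain ⟨v, t, hvt⟩ := List.exists_cons_of_ne_nil hne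
      refine ⟨v, t, hvt, ?_⟩
      have hget : (alerts.flatten.foldl pvStep PySem.Dict.empty).get? k
          = some (v, t.all (fun x => v == x)) := by
        rw [get?_foldl_pvStep, hvals, hvt]
        have hemp : PySem.Dict.get? (PySem.Dict.empty : PySem.Dict String (String × Bool)) k = none := rfl
        rw [hemp]
        show pvRun (some (v, true)) t = _
        rw [pvRun_some]
        simp
      simp [PySem.Dict.getD, hget]
    -- compare the two filter-then-map forms pointwise
    apply Eq.symm
    rw [List.filter_congr (q := fun k => decide (PySem.Set.len (PySem.Set.ofList
          (alerts.filterMap (fun alert => pvGetKey? alert k))) = 1))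
        ?_]
    · apply List.map_congr_left
      intro k hkf
      have hk := List.mem_of_mem_filter hkf
      obtain ⟨v, t, hvt, hgd⟩ := point k hk
      simp [hgd, hvt]
    · intro k hk
      obtain ⟨v, t, hvt, hgd⟩ := point k hk
      simp only [Function.comp_apply, hgd]
      exact (decide_eq_of_iff _ _ (by rw [hvt]; exact setLen_one_iff v t)).symm
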